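-- pv_equiv track=rewrite | github.com/Hemnath0075/da6401_assignment2 | wandb_train.py | generate_filters
-- ===== SOURCE A (Python) =====
-- def generate_filters(base_m, strategy):
--             if strategy == 'same':
--                 return [base_m] * 5
--             elif strategy == 'double':
--                 return [base_m * (2 ** i) for i in range(5)]
--             elif strategy == 'half':
--                 return [max(1, base_m // (2 ** i)) for i in range(5)]
--             else:
--                 raise ValueError(f"Unknown strategy: {strategy}")
-- ===== SOURCE B (Python) =====
-- def _unfold(x, step, k):
--     # recursively generate [x, step(x), step(step(x)), ...] of length k
--     if k == 0:
--         return []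
--     return [x] + _unfold(step(x), step, k - 1)
--
-- def generate_filters(base_m, strategy):
--     steps = {'same': lambda v: v, 'double': lambda v: v << 1, 'half': lambda v: v >> 1}
--     if strategy not in steps:
--         raise ValueError(f"Unknown strategy: {strategy}")
--     seq = _unfold(base_m, steps[strategy], 5)
--     return [max(1, v) for v in seq] if strategy == 'half' else seq
-- ===== Notes on version B (the rewrite author's own statement) =====
-- stated objective: alternative
-- what changed: Replaces the three per-strategy list comprehensions computing 2**i per element by a generic recursive unfold that cons-builds the orbit of a dispatched bit-shift step function, with the half-strategy clamp applied in a separate map pass afterwards.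
import Mathlib
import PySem

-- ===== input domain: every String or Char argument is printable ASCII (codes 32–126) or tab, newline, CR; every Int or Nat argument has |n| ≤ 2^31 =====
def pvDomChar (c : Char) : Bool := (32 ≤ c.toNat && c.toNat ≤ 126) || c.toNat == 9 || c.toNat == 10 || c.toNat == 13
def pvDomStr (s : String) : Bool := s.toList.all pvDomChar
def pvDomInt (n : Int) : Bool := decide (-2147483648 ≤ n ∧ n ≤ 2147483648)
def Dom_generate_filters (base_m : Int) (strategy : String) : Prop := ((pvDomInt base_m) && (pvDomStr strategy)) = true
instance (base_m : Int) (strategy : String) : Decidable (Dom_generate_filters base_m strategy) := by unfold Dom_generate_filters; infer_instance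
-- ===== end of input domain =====

-- B builds the list as the orbit of a dispatched shift step via a generic recursive unfold, clamping afterwards; A uses per-strategy comprehensions with 2**i. Equivalence of return values proved on the known strategies.

-- ===== PORT A =====
-- A: branch on strategy; 'same' → [base_m]*5, 'double'/'half' → comprehension over range(5) with 2**i; else raise ValueError.
def generate_filters (base_m : Int) (strategy : String) : List Int :=
  if strategy == "same" then
    List.replicate 5 base_m
  else if strategy == "double" then
    (PySem.List.pyRange 0 5 1).map (fun i => base_m * (2 : Int) ^ i.toNat)
  else if strategy == "half" then
    (PySem.List.pyRange 0 5 1).map (fun i => max 1 (PySem.Int.floordiv base_m ((2 : Int) ^ i.toNat)))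
  else
    []  -- Python raises ValueError here; excluded by Pre_generate_filters

-- ===== PORT B =====
-- B's recursive unfold: [x, step x, step (step x), …] of length k, built head-first.
def gfUnfold (x : Int) (step : Int → Int) : Nat → List Int
  | 0 => []
  | k + 1 => x :: gfUnfold (step x) step k

-- dict dispatch: strategy → step function ('v << 1' = v*2, 'v >> 1' = floordiv v 2 in Python); none = KeyError branch → ValueError
def gfStep? (strategy : String) : Option (Int → Int) :=
  if strategy == "same" then some (fun v => v)
  else if strategy == "double" then some (fun v => v * 2)
  else if strategy == "half" then some (fun v => PySem.Int.floordiv v 2)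
  else none

def generate_filters_alt (base_m : Int) (strategy : String) : List Int :=
  match gfStep? strategy with
  | none => []  -- Python raises ValueError here; excluded by Pre_generate_filters
  | some step =>
    let seq := gfUnfold base_m step 5
    if strategy == "half" then seq.map (fun v => max 1 v) else seq

-- ===== PRECONDITION & SPEC =====
-- Pre_ excludes exactly the unknown strategies, on which Python A raises ValueError (and B raises too).
def Pre_generate_filters (_base_m : Int) (strategy : String) : Prop :=
  strategy = "same" ∨ strategy = "double" ∨ strategy = "half"
instance (base_m : Int) (strategy : String) : Decidable (Pre_generate_filters base_m strategy) := by
  unfold Pre_generate_filters; infer_instance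

def pvWitness_generate_filters : Int × String := (16, "half")

def Spec_generate_filters (base_m : Int) (strategy : String) (out : List Int) : Prop := out = generate_filters_alt base_m strategy
instance (base_m : Int) (strategy : String) (out : List Int) : Decidable (Spec_generate_filters base_m strategy out) := by unfold Spec_generate_filters; infer_instance

-- ===== CLAIM (what is proved, stated in full; the proofs are below) =====
def Claim_equal_generate_filters : Prop := ∀ (base_m : Int) (strategy : String), Dom_generate_filters base_m strategy → Pre_generate_filters base_m strategy → Spec_generate_filters base_m strategy (generate_filters base_m strategy)

-- ===== LEMMAS AND PROOFS =====

-- ===== VERDICT (by name: the statement is the Claim_ definition above) =====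
theorem generate_filters_spec : Claim_equal_generate_filters := by
  intro base_m strategy _ hpre
  unfold Spec_generate_filters
  rcases hpre with h | h | h <;> subst h
  · simp [generate_filters, generate_filters_alt, gfStep?, gfUnfold]
  · simp [generate_filters, generate_filters_alt, gfStep?, gfUnfold, PySem.List.pyRange,
      List.range_succ]
    refine ⟨by ring, by ring, by ring⟩
  · simp [generate_filters, generate_filters_alt, gfStep?, gfUnfold, PySem.List.pyRange,
      List.range_succ]
    omega
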